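-- pv_equiv track=rewrite | github.com/Lingzhi-UTokyo/Block_ED | utils_file.py | get_all_possible_vectors
-- ===== SOURCE A (Python) =====
-- def get_all_possible_vectors(cluster, max_distance=None):
--     """Get all possible bond vectors in the first quadrant below y=x."""
--     if max_distance is None:
--         max_distance = len(cluster)
--     vectors = []
--     for dx in range(max_distance):
--         for dy in range(dx + 1):
--             if dx == 0 and dy == 0:
--                 continue
--             vectors.append((dx, dy))
--     return sorted(vectors, key=lambda v: v[0]**2 + v[1]**2)
-- ===== SOURCE B (Python) =====
-- def get_all_possible_vectors(cluster, max_distance=None):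
--     """Get all possible bond vectors in the first quadrant below y=x."""
--     m = len(cluster) if max_distance is None else max_distance
--     if m <= 0:
--         return []
--     buckets = {}
--     for dx in range(m):
--         for dy in range(dx + 1):
--             if dx == 0 and dy == 0:
--                 continue
--             buckets.setdefault(dx * dx + dy * dy, []).append((dx, dy))
--     out = []
--     for k in range(2 * (m - 1) * (m - 1) + 1):
--         out += buckets.get(k, [])
--     return out
-- ===== Notes on version B (the rewrite author's own statement) =====
-- stated objective: alternative
-- what changed: Replaces A's generate-then-comparison-sort (sorted with key dx^2+dy^2) by a counting sort: vectors are grouped into per-key buckets (a dict) during the single generation pass and the buckets are concatenated in increasing key order over the bounded key range 0..2*(m-1)^2.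
import Mathlib
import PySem

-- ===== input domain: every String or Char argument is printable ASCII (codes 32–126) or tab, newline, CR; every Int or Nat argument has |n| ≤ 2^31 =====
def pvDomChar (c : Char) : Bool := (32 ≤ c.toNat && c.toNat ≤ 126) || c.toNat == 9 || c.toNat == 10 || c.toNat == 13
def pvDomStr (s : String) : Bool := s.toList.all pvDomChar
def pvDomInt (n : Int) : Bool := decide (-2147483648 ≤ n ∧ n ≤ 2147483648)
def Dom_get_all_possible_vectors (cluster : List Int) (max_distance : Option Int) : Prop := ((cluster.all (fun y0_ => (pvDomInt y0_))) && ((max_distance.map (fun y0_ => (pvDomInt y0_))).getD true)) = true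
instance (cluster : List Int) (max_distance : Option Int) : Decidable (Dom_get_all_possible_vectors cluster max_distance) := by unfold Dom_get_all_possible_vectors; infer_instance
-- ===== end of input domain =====

-- B replaces A's comparison sort (sorted with key dx^2+dy^2) by a counting sort: it groups
-- the vectors into per-key buckets in one generation pass and concatenates the buckets in
-- increasing key order (keys are bounded by 2*(m-1)^2); objective: alternative algorithm.

-- ===== PORT A =====
-- A's sort key 'v[0]**2 + v[1]**2'; pyGetD is exact here: every vector A sorts has length 2.
def pvKeyA (v : List Int) : Int := (PySem.List.pyGetD v 0 0) ^ 2 + (PySem.List.pyGetD v 1 0) ^ 2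

def get_all_possible_vectors (cluster : List Int) (max_distance : Option Int) : List (List Int) :=
  let m : Int := match max_distance with
    | none => (cluster.length : Int)
    | some v => v
  let vectors : List (List Int) :=
    (PySem.List.pyRange 0 m 1).foldl (fun acc dx =>
      (PySem.List.pyRange 0 (dx + 1) 1).foldl (fun acc2 dy =>
        if dx == 0 && dy == 0 then acc2 else acc2 ++ [[dx, dy]]) acc) []
  PySem.List.sorted vectors pvKeyA

-- ===== PORT B =====
def get_all_possible_vectors_alt (cluster : List Int) (max_distance : Option Int) : List (List Int) :=
  let m : Int := match max_distance with
    | none => (cluster.length : Int)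
    | some v => v
  if m ≤ 0 then []
  else
    let buckets : PySem.Dict Int (List (List Int)) :=
      (PySem.List.pyRange 0 m 1).foldl (fun d dx =>
        (PySem.List.pyRange 0 (dx + 1) 1).foldl (fun d2 dy =>
          if dx == 0 && dy == 0 then d2
          else d2.modify (dx * dx + dy * dy) [] (fun b => b ++ [[dx, dy]])) d) ∅
    (PySem.List.pyRange 0 (2 * (m - 1) * (m - 1) + 1) 1).foldl
      (fun out k => out ++ buckets.getD k []) []

-- ===== PRECONDITION & SPEC =====
def Spec_get_all_possible_vectors (cluster : List Int) (max_distance : Option Int) (out : List (List Int)) : Prop := out = get_all_possible_vectors_alt cluster max_distance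
instance (cluster : List Int) (max_distance : Option Int) (out : List (List Int)) : Decidable (Spec_get_all_possible_vectors cluster max_distance out) := by unfold Spec_get_all_possible_vectors; infer_instance

-- ===== CLAIM (what is proved, stated in full; the proofs are below) =====
def Claim_equal_get_all_possible_vectors : Prop := ∀ (cluster : List Int) (max_distance : Option Int), Dom_get_all_possible_vectors cluster max_distance → Spec_get_all_possible_vectors cluster max_distance (get_all_possible_vectors cluster max_distance)

-- ===== LEMMAS AND PROOFS =====

-- The generated (key, vector) pairs, in A's generation order.
def pvPairs (m : Int) : List (Int × List Int) :=
  (PySem.List.pyRange 0 m 1).flatMap (fun dx =>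
    ((PySem.List.pyRange 0 (dx + 1) 1).filter (fun dy => !(dx == 0 && dy == 0))).map
      (fun dy => (dx * dx + dy * dy, [dx, dy])))

-- 'continue'-shaped loop body: skip when p holds.
theorem pv_foldl_skip {α β : Type} (p : α → Bool) (f : β → α → β) (l : List α) (init : β) :
    l.foldl (fun a x => if p x then a else f a x) init
      = (l.filter (fun x => !p x)).foldl f init := by
  have h : (fun (a : β) (x : α) => if p x then a else f a x)
      = (fun a x => if (!p x) = true then f a x else a) := by
    funext a x; cases p x <;> simp
  rw [h, PySem.List.foldl_if_eq_foldl_filter]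

theorem pv_insertBy_skip_append {α : Type} (before : α → α → Bool) (x : α) (ys zs : List α)
    (h : ∀ y ∈ ys, before x y = false) :
    PySem.List.insertBy before x (ys ++ zs) = ys ++ PySem.List.insertBy before x zs := by
  induction ys with
  | nil => simp
  | cons y t ih =>
    have hy : before x y = false := h y (by simp)
    simp [PySem.List.insertBy, hy, ih (fun z hz => h z (by simp [hz]))]

theorem pv_insertBy_front {α : Type} (before : α → α → Bool) (x : α) (zs : List α)
    (h : ∀ z ∈ zs, before x z = true) :
    PySem.List.insertBy before x zs = x :: zs := by
  cases zs with
  | nil => simp [PySem.List.insertBy]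
  | cons z t => simp [PySem.List.insertBy, h z (by simp)]

-- Inserting x into a list grouped by strictly increasing keys appends it to its own group.
theorem pv_insertBy_grouped {α : Type} (keyf : α → Int) (x : α) (ks : List Int)
    (g : Int → List α)
    (hks : ks.Pairwise (· < ·))
    (hg : ∀ k ∈ ks, ∀ y ∈ g k, keyf y = k)
    (hx : keyf x ∈ ks) :
    PySem.List.insertBy (fun u v => decide (keyf u < keyf v)) x (ks.flatMap g)
      = ks.flatMap (fun k => g k ++ if keyf x == k then [x] else []) := by
  induction ks with
  | nil => cases hx
  | cons k ks' ih =>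
    have hlt : ∀ k' ∈ ks', k < k' := (List.pairwise_cons.mp hks).1
    rcases List.mem_cons.mp hx with heq | hmem
    · -- keyf x = k: skip the k-group, land in front of the rest
      have h1 : ∀ y ∈ g k, (decide (keyf x < keyf y)) = false := by
        intro y hy
        have := hg k (by simp) y hy
        simp [heq, this]
      have h2 : ∀ z ∈ ks'.flatMap g, (decide (keyf x < keyf z)) = true := by
        intro z hz
        rcases List.mem_flatMap.mp hz with ⟨k', hk', hzk⟩
        have hz' := hg k' (by simp [hk']) z hzk
        have := hlt k' hk'
        simp [heq, hz']; omega
      have htail : ks'.flatMap (fun k' => g k' ++ if keyf x == k' then [x] else [])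
          = ks'.flatMap g := by
        apply List.flatMap_congr
        intro k' hk'
        have : keyf x ≠ k' := by have := hlt k' hk'; omega
        simp [this]
      rw [List.flatMap_cons, pv_insertBy_skip_append _ _ _ _ h1,
        pv_insertBy_front _ _ _ h2, List.flatMap_cons, htail]
      simp [heq]
    · -- keyf x belongs to a later group
      have hkx : k < keyf x := hlt _ hmem
      have h1 : ∀ y ∈ g k, (decide (keyf x < keyf y)) = false := by
        intro y hy
        have := hg k (by simp) y hy
        simp [this]; omega
      have hne : (keyf x == k) = false := by simp; omega
      rw [List.flatMap_cons, pv_insertBy_skip_append _ _ _ _ h1, List.flatMap_cons,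
        ih (List.pairwise_cons.mp hks).2 (fun k' hk' => hg k' (by simp [hk'])) hmem]
      simp [hne]

-- Stability of Python's sorted with integer keys in [a, b): it is exactly the
-- concatenation, over k = a, a+1, …, b-1, of the key-k elements in original order.
theorem pv_sorted_eq_flatMap_filter {α : Type} (keyf : α → Int) (a b : Int) (xs : List α)
    (h : ∀ x ∈ xs, a ≤ keyf x ∧ keyf x < b) :
    PySem.List.sorted xs keyf
      = (PySem.List.pyRange a b 1).flatMap (fun k => xs.filter (fun x => keyf x == k)) := by
  induction xs using List.reverseRecOn with
  | nil => simp [PySem.List.sorted_eq_foldl_insertBy]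
  | append_singleton l x ih =>
    have hl : ∀ y ∈ l, a ≤ keyf y ∧ keyf y < b := fun y hy => h y (by simp [hy])
    have hx : a ≤ keyf x ∧ keyf x < b := h x (by simp)
    rw [PySem.List.sorted_eq_foldl_insertBy, List.foldl_append, List.foldl_cons,
      List.foldl_nil, ← PySem.List.sorted_eq_foldl_insertBy, ih hl,
      pv_insertBy_grouped keyf x _ _ (PySem.List.pairwise_lt_pyRange_one a b)
        (fun k _ y hy => by simpa using (List.mem_filter.mp hy).2)
        (PySem.List.mem_pyRange_one.mpr hx)]
    apply List.flatMap_congr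
    intro k _
    by_cases hk : keyf x = k <;> simp [List.filter_append, hk]

-- A's generation loop produces the vectors of pvPairs, in order.
theorem pv_gen_eq (m : Int) :
    ((PySem.List.pyRange 0 m 1).foldl (fun acc dx =>
      (PySem.List.pyRange 0 (dx + 1) 1).foldl (fun acc2 dy =>
        if dx == 0 && dy == 0 then acc2 else acc2 ++ [[dx, dy]]) acc) [])
      = (pvPairs m).map (·.2) := by
  have hinner : ∀ (dx : Int) (acc : List (List Int)),
      (PySem.List.pyRange 0 (dx + 1) 1).foldl (fun acc2 dy =>
        if dx == 0 && dy == 0 then acc2 else acc2 ++ [[dx, dy]]) acc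
      = acc ++ ((PySem.List.pyRange 0 (dx + 1) 1).filter
          (fun dy => !(dx == 0 && dy == 0))).map (fun dy => [dx, dy]) := by
    intro dx acc
    rw [pv_foldl_skip (fun dy => dx == 0 && dy == 0)
      (fun acc2 dy => acc2 ++ [[dx, dy]])]
    exact PySem.List.foldl_append_singleton_eq_map _ _ _
  simp only [hinner]
  rw [PySem.List.foldl_append_eq_flatMap]
  simp [pvPairs, List.map_flatMap, List.map_map, Function.comp_def]

-- B's bucket dictionary is the fold of pvPairs through setdefault-append.
theorem pv_dict_eq (m : Int) :
    ((PySem.List.pyRange 0 m 1).foldl (fun d dx =>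
      (PySem.List.pyRange 0 (dx + 1) 1).foldl (fun d2 dy =>
        if dx == 0 && dy == 0 then d2
        else d2.modify (dx * dx + dy * dy) [] (fun b => b ++ [[dx, dy]])) d)
      (∅ : PySem.Dict Int (List (List Int))))
      = (pvPairs m).foldl (fun d p => d.modify p.1 [] (fun b => b ++ [p.2])) ∅ := by
  rw [pvPairs, List.foldl_flatMap]
  congr 1
  funext d dx
  rw [pv_foldl_skip, List.foldl_map]

-- Every generated pair carries its vector's sort key, bounded by 2*(m-1)^2.
theorem pv_pairs_key (m : Int) :
    ∀ p ∈ pvPairs m, pvKeyA p.2 = p.1 ∧ 0 ≤ p.1 ∧ p.1 < 2 * (m - 1) * (m - 1) + 1 := by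
  intro p hp
  simp only [pvPairs, List.mem_flatMap, List.mem_map, List.mem_filter,
    PySem.List.mem_pyRange_one] at hp
  obtain ⟨dx, ⟨hdx0, hdxm⟩, dy, ⟨⟨hdy0, hdyx⟩, -⟩, rfl⟩ := hp
  refine ⟨?_, by positivity, by nlinarith⟩
  simp [pvKeyA, PySem.List.pyGetD]
  ring

-- ===== VERDICT (by name: the statement is the Claim_ definition above) =====
theorem get_all_possible_vectors_spec : Claim_equal_get_all_possible_vectors := by
  intro cluster max_distance _
  unfold Spec_get_all_possible_vectors get_all_possible_vectors get_all_possible_vectors_alt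
  simp only []
  generalize (match max_distance with
    | none => (cluster.length : Int)
    | some v => v) = m
  by_cases hm0 : m ≤ 0
  · -- no vectors at all
    rw [if_pos hm0, PySem.List.pyRange_one_eq_nil (by omega)]
    simp [PySem.List.sorted_eq_foldl_insertBy]
  · rw [if_neg hm0, pv_gen_eq, pv_dict_eq, PySem.List.foldl_append_eq_flatMap]
    have hget : ∀ k : Int,
        ((pvPairs m).foldl (fun d p => d.modify p.1 [] (fun b => b ++ [p.2]))
          (∅ : PySem.Dict Int (List (List Int)))).getD k []
        = ((pvPairs m).filter (fun p => p.1 == k)).map (·.2) := by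
      intro k
      rw [PySem.Dict.getD_foldl_modify_append]
      rw [show (∅ : PySem.Dict Int (List (List Int))) = PySem.Dict.empty from rfl,
        PySem.Dict.getD_empty]
      simp
    rw [pv_sorted_eq_flatMap_filter pvKeyA 0 (2 * (m - 1) * (m - 1) + 1)
      ((pvPairs m).map (·.2))
      (by
        intro v hv
        rcases List.mem_map.mp hv with ⟨p, hp, rfl⟩
        have := pv_pairs_key m p hp
        omega)]
    simp only [hget, List.nil_append]
    apply List.flatMap_congr
    intro k _
    rw [List.filter_map]
    congr 1
    apply List.filter_congr
    intro p hp
    have := (pv_pairs_key m p hp).1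
    simp [this]
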